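-- pv_equiv track=rewrite | github.com/Yunjaejo/algorithm | 프로그래머스/level2/방금그곡.py | solution
-- ===== SOURCE A (Python) =====
-- def time_to_minute(x):  # HH:MM 을 분으로 변환해주는 함수
--     return int(x.split(':')[0]) * 60 + int(x.split(':')[1])
--
-- def get_play_time(x):  # 음악이 총 재생된 분 수를 구하는 함수
--     return time_to_minute(x.split(',')[1]) - time_to_minute(x.split(',')[0])
--
-- def sharp_to_lower(x):  # '#'이 len(str) 에서 1칸을 차지하지 않게하기위해 올림음을 소문자로 치환해주는 함수
--     return x.replace('C#', 'c').replace('D#', 'd').replace('F#', 'f').replace('G#', 'g').replace('A#', 'a')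
--
-- def solution(m, musicinfos):
--     answer = []
--     for music in musicinfos:
--         m = sharp_to_lower(m)
--         that_sound = sharp_to_lower(music.split(',')[3])
--         play_time = get_play_time(music)
--         if play_time == len(that_sound):  # 재생시간이 같으면 음계 그대로
--             that_sound = that_sound
--         elif play_time > len(that_sound):  # 재생시간이 더 길다면 음계 반복 재생 + 남은시간 음계 붙이기
--             that_sound = that_sound * (play_time // len(that_sound)) + that_sound[:play_time % len(that_sound)]
--         elif play_time < len(that_sound):  # 재생시간이 더 짧다면 재생시간까지만 음계 재생
--             that_sound = that_sound[:play_time % len(that_sound)]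
--
--         if m in that_sound:  # 내가 들은 음이 that_sound 에 있다면
--             answer.append([play_time, music.split(',')[2]])  # 재생시간과 제목을 정답배열에 추가
--
--     if answer:  # 정답이 있다면
--         return sorted(answer, key=lambda x: (-x[0]))[0][1]  # 정답을 0번인덱스(재생시간) 내림차순으로 정렬 후 제목만 뽑기.
--     else:
--         return '(None)'
-- ===== SOURCE B (Python) =====
-- def sharp_to_lower(x):
--     return x.replace('C#', 'c').replace('D#', 'd').replace('F#', 'f').replace('G#', 'g').replace('A#', 'a')
--
-- def solution(m, musicinfos):
--     heard = sharp_to_lower(m)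
--     best = None
--     for music in musicinfos:
--         fields = music.split(',')
--         start, end = fields[0].split(':'), fields[1].split(':')
--         play_time = (int(end[0]) - int(start[0])) * 60 + int(end[1]) - int(start[1])
--         sound = sharp_to_lower(fields[3])
--         if sound:
--             q, r = divmod(play_time, len(sound))
--             melody = sound * q + sound[:r]
--         else:
--             melody = sound
--         if heard in melody and (best is None or play_time > best[0]):
--             best = (play_time, fields[2])
--     return '(None)' if best is None else best[1]
-- ===== Notes on version B (the rewrite author's own statement) =====
-- stated objective: simpler
-- what changed: B collapses A's three-way play-time branch into the single divmod closed form sound*q + sound[:r], splits each entry once, and keeps a running (strictly greater) best instead of collecting all matches and stably sorting them by -play_time.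
import Mathlib
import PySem

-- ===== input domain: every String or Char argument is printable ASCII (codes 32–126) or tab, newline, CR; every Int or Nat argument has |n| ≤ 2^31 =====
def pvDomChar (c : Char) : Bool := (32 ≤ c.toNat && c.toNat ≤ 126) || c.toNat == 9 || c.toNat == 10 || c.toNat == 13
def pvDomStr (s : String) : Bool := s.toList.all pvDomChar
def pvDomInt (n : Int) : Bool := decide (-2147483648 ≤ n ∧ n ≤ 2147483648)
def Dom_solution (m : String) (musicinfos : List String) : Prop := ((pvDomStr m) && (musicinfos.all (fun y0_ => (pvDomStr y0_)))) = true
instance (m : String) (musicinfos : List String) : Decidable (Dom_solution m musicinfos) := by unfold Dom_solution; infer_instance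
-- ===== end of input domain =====

-- B replaces A's three-way play-time branch by one divmod closed form, splits each entry
-- once, and keeps a running best instead of building a list and sorting it (objective: simpler).

-- shared helper (both Pythons define the same sharp_to_lower)
def sharpToLower (x : String) : String :=
  PySem.Str.replace (PySem.Str.replace (PySem.Str.replace (PySem.Str.replace
    (PySem.Str.replace x "C#" "c") "D#" "d") "F#" "f") "G#" "g") "A#" "a"

-- s.split(sep) with a nonempty literal sep (the `.getD []` default is unreachable: sep ≠ "")
def pySplit (s sep : String) : List String := (PySem.Str.split? s sep).getD []

-- ===== PORT A =====
-- `.getD 0` / pyGetD defaults below are only reachable where the Python raises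
-- (IndexError / ValueError); Pre_solution excludes those inputs.
def timeToMinute (x : String) : Int :=
  (PySem.Int.ofStr? (PySem.List.pyGetD (pySplit x ":") 0 "")).getD 0 * 60
    + (PySem.Int.ofStr? (PySem.List.pyGetD (pySplit x ":") 1 "")).getD 0

def getPlayTime (x : String) : Int :=
  timeToMinute (PySem.List.pyGetD (pySplit x ",") 1 "")
    - timeToMinute (PySem.List.pyGetD (pySplit x ",") 0 "")

-- the body of A's `for music in musicinfos` loop; state = (m, answer)
def stepA (st : String × List (Int × String)) (music : String) :
    String × List (Int × String) :=
  let m' := sharpToLower st.1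
  let thatSound := (sharpToLower (PySem.List.pyGetD (pySplit music ",") 3 "")).toList
  let playTime := getPlayTime music
  let L : Int := (thatSound.length : Int)
  -- A's three-way branch; `//` and `%` are Python's (by zero they raise: outside Pre_)
  let ts2 : List Char :=
    if playTime = L then thatSound
    else if playTime > L then
      PySem.List.pyRepeat thatSound (PySem.Int.floordiv playTime L)
        ++ PySem.List.slice thatSound none (some (PySem.Int.mod playTime L))
    else PySem.List.slice thatSound none (some (PySem.Int.mod playTime L))
  if PySem.Chars.isIn m'.toList ts2 then
    (m', st.2 ++ [(playTime, PySem.List.pyGetD (pySplit music ",") 2 "")])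
  else (m', st.2)

def solution (m : String) (musicinfos : List String) : String :=
  let st := musicinfos.foldl stepA (m, [])
  if st.2 ≠ [] then
    (PySem.List.pyGetD (PySem.List.sorted st.2 (fun x => -x.1) false) 0 (0, "")).2
  else "(None)"

-- ===== PORT B =====
-- the body of B's loop; state = best : Option (play_time, title)
def stepB (heard : List Char) (best : Option (Int × String)) (music : String) :
    Option (Int × String) :=
  let fields := pySplit music ","
  let start := pySplit (PySem.List.pyGetD fields 0 "") ":"
  let fin := pySplit (PySem.List.pyGetD fields 1 "") ":"
  let playTime :=
    ((PySem.Int.ofStr? (PySem.List.pyGetD fin 0 "")).getD 0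
      - (PySem.Int.ofStr? (PySem.List.pyGetD start 0 "")).getD 0) * 60
    + (PySem.Int.ofStr? (PySem.List.pyGetD fin 1 "")).getD 0
    - (PySem.Int.ofStr? (PySem.List.pyGetD start 1 "")).getD 0
  let sound := (sharpToLower (PySem.List.pyGetD fields 3 "")).toList
  let melody : List Char :=
    if sound ≠ [] then
      -- q, r = divmod(play_time, len(sound)); the divisor is nonzero in this branch
      PySem.List.pyRepeat sound (PySem.Int.floordiv playTime (sound.length : Int))
        ++ PySem.List.slice sound none (some (PySem.Int.mod playTime (sound.length : Int)))
    else sound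
  if PySem.Chars.isIn heard melody then
    match best with
    | none => some (playTime, PySem.List.pyGetD fields 2 "")
    | some b =>
      if playTime > b.1 then some (playTime, PySem.List.pyGetD fields 2 "") else some b
  else best

def solution_alt (m : String) (musicinfos : List String) : String :=
  let heard := (sharpToLower m).toList
  match musicinfos.foldl (stepB heard) none with
  | some b => b.2
  | none => "(None)"

-- ===== PRECONDITION & SPEC =====
-- Per entry: at least 4 comma fields, the two clock fields have int()-parseable hour and
-- minute parts, and an entry whose melody is empty must have zero play time.  Exactly the
-- inputs where A raises (IndexError / ValueError / ZeroDivisionError) are excluded.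
def preParse (music : String) : Bool :=
  let fields := pySplit music ","
  let start := pySplit (PySem.List.pyGetD fields 0 "") ":"
  let fin := pySplit (PySem.List.pyGetD fields 1 "") ":"
  decide (4 ≤ fields.length)
    && (PySem.Int.ofStr? (PySem.List.pyGetD start 0 "")).isSome
    && (PySem.Int.ofStr? (PySem.List.pyGetD start 1 "")).isSome
    && (PySem.Int.ofStr? (PySem.List.pyGetD fin 0 "")).isSome
    && (PySem.Int.ofStr? (PySem.List.pyGetD fin 1 "")).isSome

def preMusic (music : String) : Bool :=
  let fields := pySplit music ","
  let start := pySplit (PySem.List.pyGetD fields 0 "") ":"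
  let fin := pySplit (PySem.List.pyGetD fields 1 "") ":"
  let sound := (sharpToLower (PySem.List.pyGetD fields 3 "")).toList
  let pt :=
    (PySem.Int.ofStr? (PySem.List.pyGetD fin 0 "")).getD 0 * 60
      + (PySem.Int.ofStr? (PySem.List.pyGetD fin 1 "")).getD 0
      - ((PySem.Int.ofStr? (PySem.List.pyGetD start 0 "")).getD 0 * 60
          + (PySem.Int.ofStr? (PySem.List.pyGetD start 1 "")).getD 0)
  preParse music && (!sound.isEmpty || decide (pt = 0))

def Pre_solution (m : String) (musicinfos : List String) : Prop :=
  musicinfos.all preMusic = true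

instance (m : String) (musicinfos : List String) : Decidable (Pre_solution m musicinfos) := by
  unfold Pre_solution; infer_instance

def pvWitness_solution : String × List String := ("ABC", ["10:00,10:03,TITLE,ABCDEF"])

def Spec_solution (m : String) (musicinfos : List String) (out : String) : Prop :=
  out = solution_alt m musicinfos

instance (m : String) (musicinfos : List String) (out : String) :
    Decidable (Spec_solution m musicinfos out) := by
  unfold Spec_solution; infer_instance

-- ===== CLAIM (what is proved, stated in full; the proofs are below) =====
def Claim_equal_solution : Prop := ∀ (m : String) (musicinfos : List String),
  Dom_solution m musicinfos → Pre_solution m musicinfos →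
    Spec_solution m musicinfos (solution m musicinfos)

-- ===== LEMMAS AND PROOFS =====

-- ---- replace "X#" "x" as a plain structural scan ----
def rep (X x : Char) : List Char → List Char
  | [] => []
  | [c] => [c]
  | c1 :: c2 :: rest =>
    if c1 = X ∧ c2 = '#' then x :: rep X x rest else c1 :: rep X x (c2 :: rest)

theorem isPrefixOf_pair (X c1 c2 : Char) (rest : List Char) :
    ([X, '#'].isPrefixOf (c1 :: c2 :: rest)) = (X == c1 && '#' == c2) := by
  simp [List.isPrefixOf]

theorem rep_go_eq (X x : Char) : ∀ (fuel : Nat) (l acc : List Char), l.length ≤ fuel →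
    PySem.Chars.replace.go [X, '#'] [x] fuel l acc = acc.reverse ++ rep X x l := by
  intro fuel
  induction fuel with
  | zero =>
    intro l acc hl
    have h : l = [] := List.eq_nil_of_length_eq_zero (Nat.le_zero.mp hl)
    subst h
    simp [PySem.Chars.replace.go, rep]
  | succ n ih =>
    intro l acc hl
    match l with
    | [] => simp [PySem.Chars.replace.go, rep]
    | [c] =>
      have hpre : ([X, '#'].isPrefixOf [c]) = false := by
        simp [List.isPrefixOf]
      rw [PySem.Chars.replace.go, hpre]
      simp only [Bool.false_eq_true, if_false]
      rw [ih [] (c :: acc) (by simp)]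
      simp [rep]
    | c1 :: c2 :: rest =>
      rw [PySem.Chars.replace.go, isPrefixOf_pair]
      by_cases hp : c1 = X ∧ c2 = '#'
      · rw [show (X == c1 && '#' == c2) = true by simp [hp.1, hp.2]]
        simp only [if_true]
        rw [show ([X, '#'] : List Char).length = 2 from rfl]
        rw [show ([x] : List Char).reverse ++ acc = x :: acc from rfl,
          show List.drop 2 (c1 :: c2 :: rest) = rest from rfl]
        rw [ih rest (x :: acc) (by simp at hl; omega)]
        simp [rep, hp]
      · rw [show (X == c1 && '#' == c2) = false by
          simp only [Bool.and_eq_false_iff, beq_eq_false_iff_ne, ne_eq]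
          rcases Decidable.not_and_iff_or_not.mp hp with h | h
          · exact Or.inl (fun hh => h hh.symm)
          · exact Or.inr (fun hh => h hh.symm)]
        simp only [Bool.false_eq_true, if_false]
        rw [ih (c2 :: rest) (c1 :: acc) (by simp at hl ⊢; omega)]
        simp [rep, hp]

theorem single_prefix_iff (L : List Char) : (['#'] <+: L) ↔ L.head? = some '#' := by
  cases L with
  | nil => simp
  | cons b bs => simp [List.cons_prefix_cons, eq_comm]

theorem pair_prefix_iff (X a : Char) (L : List Char) :
    ([X, '#'] <+: a :: L) ↔ (a = X ∧ L.head? = some '#') := by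
  rw [show ([X, '#'] : List Char) = X :: ['#'] from rfl, List.cons_prefix_cons,
    single_prefix_iff, eq_comm]

theorem pair_infix_cons (X a : Char) (L : List Char) :
    ([X, '#'] <:+: a :: L) ↔ (a = X ∧ L.head? = some '#') ∨ [X, '#'] <:+: L := by
  rw [List.infix_cons_iff, pair_prefix_iff]

theorem head?_rep (X x : Char) (hx : x ≠ '#') :
    ∀ s : List Char, (rep X x s).head? = some '#' → s.head? = some '#' := by
  intro s h
  match s with
  | [] => simp [rep] at h
  | [c] => simpa [rep] using h
  | c1 :: c2 :: rest =>
    by_cases hp : c1 = X ∧ c2 = '#'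
    · rw [rep, if_pos hp] at h
      simp at h
      exact absurd h hx
    · rw [rep, if_neg hp] at h
      simpa using h

theorem infix_tail {l L : List Char} (a : Char) (h : l <:+: L) : l <:+: a :: L :=
  List.infix_cons_iff.mpr (Or.inr h)

theorem rep_not_infix_self (X x : Char) (hx : x ≠ '#') (hxX : x ≠ X) (s : List Char) :
    ¬ [X, '#'] <:+: rep X x s := by
  induction s using rep.induct (X := X) with
  | case1 => simp [rep]
  | case2 c =>
    rw [rep]
    intro h
    have := List.IsInfix.length_le h
    simp at this
  | case3 c1 c2 rest hp ih =>
    rw [rep, if_pos hp, pair_infix_cons]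
    rintro (⟨h1, -⟩ | h)
    · exact hxX h1
    · exact ih h
  | case4 c1 c2 rest hp ih =>
    rw [rep, if_neg hp, pair_infix_cons]
    rintro (⟨h1, h2⟩ | h)
    · have hh := head?_rep X x hx _ h2
      simp at hh
      exact hp ⟨h1, hh⟩
    · exact ih h

theorem rep_preserve_not_infix (X x Y : Char) (hx : x ≠ '#') (hY : Y ≠ x)
    (s : List Char) (h : ¬ [Y, '#'] <:+: s) : ¬ [Y, '#'] <:+: rep X x s := by
  induction s using rep.induct (X := X) with
  | case1 => rw [rep]; exact h
  | case2 c => simp only [rep]; exact h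
  | case3 c1 c2 rest hp ih =>
    rw [rep, if_pos hp, pair_infix_cons]
    rintro (⟨h1, -⟩ | hi)
    · exact hY h1.symm
    · exact ih (fun hr => h (infix_tail _ (infix_tail _ hr))) hi
  | case4 c1 c2 rest hp ih =>
    rw [rep, if_neg hp, pair_infix_cons]
    rintro (⟨h1, h2⟩ | hi)
    · have hh := head?_rep X x hx _ h2
      exact h (List.infix_cons_iff.mpr (Or.inl ((pair_prefix_iff Y c1 _).mpr ⟨h1, hh⟩)))
    · exact ih (fun hr => h (infix_tail _ hr)) hi

theorem rep_id_of_not_infix (X x : Char) (s : List Char) (h : ¬ [X, '#'] <:+: s) :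
    rep X x s = s := by
  induction s using rep.induct (X := X) with
  | case1 => rfl
  | case2 c => rfl
  | case3 c1 c2 rest hp ih =>
    exact absurd (List.infix_cons_iff.mpr
      (Or.inl ((pair_prefix_iff X c1 _).mpr ⟨hp.1, by simp [hp.2]⟩))) h
  | case4 c1 c2 rest hp ih =>
    rw [rep, if_neg hp, ih (fun hr => h (infix_tail _ hr))]

theorem replace_eq_rep (s : List Char) (X x : Char) :
    PySem.Chars.replace s [X, '#'] [x] = rep X x s := by
  unfold PySem.Chars.replace
  rw [show ([X, '#'] : List Char).isEmpty = false from rfl]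
  simp only [Bool.false_eq_true, if_false]
  rw [rep_go_eq X x s.length s [] (le_refl _)]
  rfl

theorem sharp_toList (s : String) : (sharpToLower s).toList =
    rep 'A' 'a' (rep 'G' 'g' (rep 'F' 'f' (rep 'D' 'd' (rep 'C' 'c' s.toList)))) := by
  unfold sharpToLower
  simp only [PySem.Str.toList_replace]
  rw [show "C#".toList = ['C', '#'] from rfl, show "c".toList = ['c'] from rfl,
    show "D#".toList = ['D', '#'] from rfl, show "d".toList = ['d'] from rfl,
    show "F#".toList = ['F', '#'] from rfl, show "f".toList = ['f'] from rfl,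
    show "G#".toList = ['G', '#'] from rfl, show "g".toList = ['g'] from rfl,
    show "A#".toList = ['A', '#'] from rfl, show "a".toList = ['a'] from rfl]
  rw [replace_eq_rep, replace_eq_rep, replace_eq_rep, replace_eq_rep, replace_eq_rep]

theorem sharp_idem (s : String) : sharpToLower (sharpToLower s) = sharpToLower s := by
  rw [← String.toList_inj, sharp_toList, sharp_toList]
  set l5 := rep 'A' 'a' (rep 'G' 'g' (rep 'F' 'f' (rep 'D' 'd' (rep 'C' 'c' s.toList)))) with hl5
  have hC : ¬ ['C', '#'] <:+: l5 := by
    rw [hl5]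
    exact rep_preserve_not_infix _ _ _ (by decide) (by decide) _
      (rep_preserve_not_infix _ _ _ (by decide) (by decide) _
        (rep_preserve_not_infix _ _ _ (by decide) (by decide) _
          (rep_preserve_not_infix _ _ _ (by decide) (by decide) _
            (rep_not_infix_self _ _ (by decide) (by decide) _))))
  have hD : ¬ ['D', '#'] <:+: l5 := by
    rw [hl5]
    exact rep_preserve_not_infix _ _ _ (by decide) (by decide) _
      (rep_preserve_not_infix _ _ _ (by decide) (by decide) _
        (rep_preserve_not_infix _ _ _ (by decide) (by decide) _
          (rep_not_infix_self _ _ (by decide) (by decide) _)))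
  have hF : ¬ ['F', '#'] <:+: l5 := by
    rw [hl5]
    exact rep_preserve_not_infix _ _ _ (by decide) (by decide) _
      (rep_preserve_not_infix _ _ _ (by decide) (by decide) _
        (rep_not_infix_self _ _ (by decide) (by decide) _))
  have hG : ¬ ['G', '#'] <:+: l5 := by
    rw [hl5]
    exact rep_preserve_not_infix _ _ _ (by decide) (by decide) _
      (rep_not_infix_self _ _ (by decide) (by decide) _)
  have hA : ¬ ['A', '#'] <:+: l5 := rep_not_infix_self _ _ (by decide) (by decide) _
  rw [rep_id_of_not_infix 'C' 'c' l5 hC, rep_id_of_not_infix 'D' 'd' l5 hD,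
    rep_id_of_not_infix 'F' 'f' l5 hF, rep_id_of_not_infix 'G' 'g' l5 hG,
    rep_id_of_not_infix 'A' 'a' l5 hA]

-- ---- head of Python's stable sort by -play_time = running strict max ----
def pick (b : Option (Int × String)) (e : Int × String) : Option (Int × String) :=
  match b with
  | none => some e
  | some h => if e.1 > h.1 then some e else some h

theorem head?_insertBy {α : Type} (before : α → α → Bool) (y : α) (l : List α) :
    (PySem.List.insertBy before y l).head? =
      some (match l with | [] => y | z :: _ => if before y z then y else z) := by
  cases l with
  | nil => rfl
  | cons z zs => cases hb : before y z <;> simp [PySem.List.insertBy, hb]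

theorem head?_foldl_insertBy {α : Type} (before : α → α → Bool) :
    ∀ (xs acc : List α),
      (xs.foldl (fun a x => PySem.List.insertBy before x a) acc).head? =
        xs.foldl (fun (b : Option α) x =>
          match b with
          | none => some x
          | some h => if before x h then some x else some h) acc.head? := by
  intro xs acc
  induction xs generalizing acc with
  | nil => rfl
  | cons x xs ih =>
    simp only [List.foldl_cons]
    rw [ih]
    congr 1
    cases acc with
    | nil => rfl
    | cons z zs =>
      rw [head?_insertBy]
      cases hb : before x z <;> simp [hb]

theorem head?_sorted_neg (ans : List (Int × String)) :
    (PySem.List.sorted ans (fun x => -x.1) false).head? = ans.foldl pick none := by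
  rw [PySem.List.sorted_eq_foldl_insertBy, head?_foldl_insertBy]
  simp only [List.head?_nil]
  congr 1
  funext b x
  cases b with
  | none => rfl
  | some h =>
    by_cases hlt : h.1 < x.1 <;> simp [pick, hlt]

-- ---- per-music data and the branch-collapse lemma ----
def ptOf (music : String) : Int :=
  let fields := pySplit music ","
  let start := pySplit (PySem.List.pyGetD fields 0 "") ":"
  let fin := pySplit (PySem.List.pyGetD fields 1 "") ":"
  ((PySem.Int.ofStr? (PySem.List.pyGetD fin 0 "")).getD 0
    - (PySem.Int.ofStr? (PySem.List.pyGetD start 0 "")).getD 0) * 60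
  + (PySem.Int.ofStr? (PySem.List.pyGetD fin 1 "")).getD 0
  - (PySem.Int.ofStr? (PySem.List.pyGetD start 1 "")).getD 0

def soundOf (music : String) : List Char :=
  (sharpToLower (PySem.List.pyGetD (pySplit music ",") 3 "")).toList

def melodyOf (music : String) : List Char :=
  let sound := soundOf music
  if sound ≠ [] then
    PySem.List.pyRepeat sound (PySem.Int.floordiv (ptOf music) (sound.length : Int))
      ++ PySem.List.slice sound none (some (PySem.Int.mod (ptOf music) (sound.length : Int)))
  else sound

def entryOf (music : String) : Int × String :=
  (ptOf music, PySem.List.pyGetD (pySplit music ",") 2 "")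

def stepStd (heard : List Char) (ans : List (Int × String)) (music : String) :
    List (Int × String) :=
  if PySem.Chars.isIn heard (melodyOf music) then ans ++ [entryOf music] else ans

theorem pt_eq (music : String) : getPlayTime music = ptOf music := by
  unfold getPlayTime timeToMinute ptOf
  ring

theorem melody_collapse (sound : List Char) (pt : Int) (h0 : sound = [] → pt = 0) :
    (if pt = (sound.length : Int) then sound
     else if pt > (sound.length : Int) then
       PySem.List.pyRepeat sound (PySem.Int.floordiv pt (sound.length : Int))
         ++ PySem.List.slice sound none (some (PySem.Int.mod pt (sound.length : Int)))
     else PySem.List.slice sound none (some (PySem.Int.mod pt (sound.length : Int)))) =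
    (if sound ≠ [] then
       PySem.List.pyRepeat sound (PySem.Int.floordiv pt (sound.length : Int))
         ++ PySem.List.slice sound none (some (PySem.Int.mod pt (sound.length : Int)))
     else sound) := by
  by_cases hs : sound = []
  · subst hs
    simp [h0 rfl]
  · have hL : 0 < (sound.length : Int) := by
      have := List.length_pos_iff.mpr hs
      omega
    rw [if_pos hs]
    by_cases h1 : pt = (sound.length : Int)
    · rw [if_pos h1, h1]
      rw [PySem.Int.floordiv_eq_ediv_of_pos hL, Int.ediv_self (by omega),
        PySem.Int.mod_eq_emod_of_pos hL, Int.emod_self]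
      rw [PySem.List.slice_to sound (le_refl (0 : Int))]
      simp [PySem.List.pyRepeat]
    · rw [if_neg h1]
      by_cases h2 : pt > (sound.length : Int)
      · rw [if_pos h2]
      · rw [if_neg h2]
        have hq : PySem.Int.floordiv pt (sound.length : Int) < 1 :=
          (PySem.Int.floordiv_lt_iff_lt_mul hL).mpr (by omega)
        have hq0 : (PySem.Int.floordiv pt (sound.length : Int)).toNat = 0 :=
          Int.toNat_of_nonpos (by omega)
        simp [PySem.List.pyRepeat, hq0]

theorem stepA_eq (st : String × List (Int × String)) (music : String)
    (h : preMusic music = true) :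
    stepA st music =
      (sharpToLower st.1, stepStd (sharpToLower st.1).toList st.2 music) := by
  have h0 : soundOf music = [] → ptOf music = 0 := by
    intro hs
    unfold preMusic at h
    simp only [Bool.and_eq_true, Bool.or_eq_true, Bool.not_eq_true',
      decide_eq_true_eq] at h
    rcases h with ⟨-, h2⟩
    unfold soundOf at hs
    rcases h2 with h2 | h2
    · exact absurd hs (by simpa using h2)
    · unfold ptOf
      linarith [h2]
  unfold stepA stepStd melodyOf entryOf
  dsimp only
  rw [pt_eq]
  rw [show (sharpToLower (PySem.List.pyGetD (pySplit music ",") 3 "")).toList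
      = soundOf music from rfl]
  rw [melody_collapse _ _ (fun hs => h0 hs)]
  split_ifs <;> rfl

theorem stepB_eq (heard : List Char) (ans : List (Int × String)) (music : String) :
    stepB heard (ans.foldl pick none) music = (stepStd heard ans music).foldl pick none := by
  have hb : ∀ b, stepB heard b music =
      if PySem.Chars.isIn heard (melodyOf music) then pick b (entryOf music) else b := by
    intro b; cases b <;> rfl
  rw [hb]
  by_cases hin : PySem.Chars.isIn heard (melodyOf music) = true
  · rw [if_pos hin]
    unfold stepStd
    rw [if_pos hin, List.foldl_append]
    rfl
  · rw [if_neg hin]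
    unfold stepStd
    rw [if_neg hin]

theorem loopA (musics : List String) : ∀ (x : String) (ans : List (Int × String)),
    musics.all preMusic = true → sharpToLower x = x →
    musics.foldl stepA (x, ans) = (x, musics.foldl (stepStd x.toList) ans) := by
  induction musics with
  | nil => intro x ans _ _; rfl
  | cons mu rest ih =>
    intro x ans hall hx
    simp only [List.all_cons, Bool.and_eq_true] at hall
    simp only [List.foldl_cons]
    rw [stepA_eq _ _ hall.1]
    simp only [hx]
    exact ih x _ hall.2 hx

theorem loopB (heard : List Char) (musics : List String) :
    ∀ (ans : List (Int × String)),
      musics.foldl (stepB heard) (ans.foldl pick none) =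
        (musics.foldl (stepStd heard) ans).foldl pick none := by
  intro ans
  induction musics generalizing ans with
  | nil => rfl
  | cons mu rest ih =>
    simp only [List.foldl_cons]
    rw [stepB_eq]
    exact ih _

theorem pick_foldl_isSome (t : List (Int × String)) (b : Int × String) :
    (t.foldl pick (some b)).isSome = true := by
  induction t generalizing b with
  | nil => rfl
  | cons e t ih =>
    simp only [List.foldl_cons, pick]
    split <;> exact ih _

theorem pyGetD_zero_cons {a : Int × String} {l : List (Int × String)} (d : Int × String) :
    PySem.List.pyGetD (a :: l) 0 d = a := by
  simp [pysem]

-- ===== VERDICT =====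
theorem solution_spec : Claim_equal_solution := by
  unfold Claim_equal_solution
  intro m musics hdom hpre
  unfold Spec_solution solution solution_alt
  dsimp only
  cases musics with
  | nil => rfl
  | cons mu rest =>
    unfold Pre_solution at hpre
    simp only [List.all_cons, Bool.and_eq_true] at hpre
    have hA : List.foldl stepA (m, []) (mu :: rest)
        = (sharpToLower m,
            List.foldl (stepStd (sharpToLower m).toList) [] (mu :: rest)) := by
      simp only [List.foldl_cons]
      rw [stepA_eq _ _ hpre.1]
      dsimp only
      rw [loopA rest (sharpToLower m) _ hpre.2 (sharp_idem m)]
    have hB : List.foldl (stepB (sharpToLower m).toList) none (mu :: rest)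
        = (List.foldl (stepStd (sharpToLower m).toList) [] (mu :: rest)).foldl pick none := by
      have := loopB (sharpToLower m).toList (mu :: rest) []
      simpa using this
    rw [hA, hB]
    cases hAF : List.foldl (stepStd (sharpToLower m).toList) [] (mu :: rest) with
    | nil => simp
    | cons a t =>
      have hsome : (t.foldl pick (some a)).isSome = true := pick_foldl_isSome t a
      obtain ⟨b, hb⟩ := Option.isSome_iff_exists.mp hsome
      have hb' : (a :: t).foldl pick none = some b := by
        simpa [pick] using hb
      have hhead : (PySem.List.sorted (a :: t) (fun x => -x.1) false).head? = some b := by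
        rw [head?_sorted_neg, hb']
      cases hs : PySem.List.sorted (a :: t) (fun x => -x.1) false with
      | nil => rw [hs] at hhead; simp at hhead
      | cons s0 ss =>
        rw [hs] at hhead
        simp only [List.head?_cons, Option.some.injEq] at hhead
        simp only [hb', pyGetD_zero_cons, hhead]
        simp
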